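-- pv_equiv track=rewrite | github.com/BriVandrey/aoc_2023 | d9.py | get_last_value
-- ===== SOURCE A (Python) =====
-- def get_last_value(arrays, idx, subtract=False):
--     val_to_return, val = 0, 0  # start with 0's
--     for i, array in enumerate(arrays[:-1]):  # iterate up to the second to last array
--         next_val = arrays[i + 1][idx]
--         if subtract:
--             val = next_val - val
--         else:
--             val = next_val + val
--         val_to_return = val
--
--     return val_to_return
-- ===== SOURCE B (Python) =====
-- def get_last_value(arrays, idx, subtract=False):
--     # signed-sum formulation: explicit column, then plain sum or alternating
--     # sum anchored so the last column element is positive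
--     col = [a[idx] for a in arrays[1:]]
--     if subtract:
--         n = len(col)
--         return sum(v if (n - 1 - k) % 2 == 0 else -v for k, v in enumerate(col))
--     return sum(col)
-- ===== Notes on version B (the rewrite author's own statement) =====
-- stated objective: simpler
-- what changed: Replaced A's stateful running accumulator (val = next_val +/- val over enumerate(arrays[:-1])) with a direct closed-form signed sum over the column arrays[1:][idx]: plain sum for add, alternating sum anchored so the last element is positive for subtract.
import Mathlib
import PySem

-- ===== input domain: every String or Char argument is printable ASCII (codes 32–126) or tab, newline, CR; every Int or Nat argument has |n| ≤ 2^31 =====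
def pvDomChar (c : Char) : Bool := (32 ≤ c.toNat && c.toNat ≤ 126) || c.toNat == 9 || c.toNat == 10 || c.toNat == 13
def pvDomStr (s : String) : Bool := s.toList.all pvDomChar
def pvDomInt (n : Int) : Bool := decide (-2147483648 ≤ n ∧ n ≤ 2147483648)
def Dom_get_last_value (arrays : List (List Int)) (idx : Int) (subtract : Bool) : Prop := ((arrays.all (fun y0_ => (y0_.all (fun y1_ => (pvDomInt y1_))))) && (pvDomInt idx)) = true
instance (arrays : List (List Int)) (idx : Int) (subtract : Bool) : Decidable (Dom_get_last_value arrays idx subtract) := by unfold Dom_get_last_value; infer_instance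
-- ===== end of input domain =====

-- B replaces A's running accumulator with a closed-form signed sum over the column (simpler decomposition).

-- ===== PORT A =====
def get_last_value (arrays : List (List Int)) (idx : Int) (subtract : Bool) : Int :=
  let st := (PySem.List.enumerate (PySem.List.slice arrays none (some (-1))) 0).foldl
    (fun (st : Int × Int) (p : Int × List Int) =>
      let next_val := PySem.List.pyGetD (PySem.List.pyGetD arrays (p.1 + 1) []) idx 0
      let val := if subtract then next_val - st.2 else next_val + st.2
      (val, val)) (0, 0)
  st.1

-- ===== PORT B =====
def get_last_value_alt (arrays : List (List Int)) (idx : Int) (subtract : Bool) : Int :=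
  let col := (PySem.List.slice arrays (some 1) none).map (fun a => PySem.List.pyGetD a idx 0)
  if subtract then
    let n : Int := col.length
    ((PySem.List.enumerate col 0).map (fun p => if (n - 1 - p.1) % 2 = 0 then p.2 else -p.2)).sum
  else col.sum

-- ===== PRECONDITION & SPEC =====
-- Pre_ excludes exactly the inputs where Python A raises IndexError: idx out of range for some accessed row.
def Pre_get_last_value (arrays : List (List Int)) (idx : Int) (subtract : Bool) : Prop :=
  ∀ a ∈ arrays.drop 1, PySem.Raise.InRange a.length idx
instance (arrays : List (List Int)) (idx : Int) (subtract : Bool) : Decidable (Pre_get_last_value arrays idx subtract) := by unfold Pre_get_last_value; infer_instance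
def pvWitness_get_last_value : List (List Int) × Int × Bool := ([[1, 2], [3, 4], [5, 6]], 1, true)

def Spec_get_last_value (arrays : List (List Int)) (idx : Int) (subtract : Bool) (out : Int) : Prop := out = get_last_value_alt arrays idx subtract
instance (arrays : List (List Int)) (idx : Int) (subtract : Bool) (out : Int) : Decidable (Spec_get_last_value arrays idx subtract out) := by unfold Spec_get_last_value; infer_instance

-- ===== CLAIM (what is proved, stated in full; the proofs are below) =====
def Claim_equal_get_last_value : Prop := ∀ (arrays : List (List Int)) (idx : Int) (subtract : Bool), Dom_get_last_value arrays idx subtract → Pre_get_last_value arrays idx subtract → Spec_get_last_value arrays idx subtract (get_last_value arrays idx subtract)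

-- ===== LEMMAS AND PROOFS =====

-- A's step on the collapsed (val_to_return, val) pair and on val alone
def stepA (subtract : Bool) (st : Int × Int) (c : Int) : Int × Int :=
  let v := if subtract then c - st.2 else c + st.2
  (v, v)

def stepV (subtract : Bool) (v c : Int) : Int := if subtract then c - v else c + v

-- recursive characterisation of B's alternating sum
def altSum : List Int → Int
  | [] => 0
  | c :: t => (if (t.length : Int) % 2 = 0 then c else -c) + altSum t

lemma foldl_stepA_pair (subtract : Bool) (l : List Int) (v : Int) :
    l.foldl (stepA subtract) (v, v) = (l.foldl (stepV subtract) v, l.foldl (stepV subtract) v) := by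
  induction l generalizing v with
  | nil => rfl
  | cons c t ih => simp [stepA, stepV, List.foldl_cons, ih]

lemma foldl_add_eq_sum (l : List Int) (v : Int) :
    l.foldl (stepV false) v = l.sum + v := by
  induction l generalizing v with
  | nil => simp
  | cons c t ih => simp [List.foldl_cons, ih, stepV]; ring

lemma foldl_sub_eq_altSum (l : List Int) (v : Int) :
    l.foldl (stepV true) v = altSum l + (if (l.length : Int) % 2 = 0 then v else -v) := by
  induction l generalizing v with
  | nil => simp [altSum]
  | cons c t ih =>
    simp only [List.foldl_cons, ih, altSum, stepV, List.length_cons]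
    rcases Int.emod_two_eq_zero_or_one (t.length : Int) with h | h <;>
      · push_cast
        simp [h, Int.add_emod]
        ring

lemma enum_signed_sum (l : List Int) (s L : Int) (h : L - s = l.length) :
    ((PySem.List.enumerate l s).map (fun p => if (L - 1 - p.1) % 2 = 0 then p.2 else -p.2)).sum
      = altSum l := by
  induction l generalizing s with
  | nil => simp [PySem.List.enumerate_nil, altSum]
  | cons c t ih =>
    simp only [PySem.List.enumerate_cons, List.map_cons, List.sum_cons, altSum]
    rw [ih (s + 1) (by simp only [List.length_cons] at h; push_cast at h ⊢; omega)]
    have hs : L - 1 - s = (t.length : Int) := by simp only [List.length_cons] at h; push_cast at h ⊢; omega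
    rw [hs]

lemma pyGetD_cons_succ_nonneg (x : List Int) (xs : List (List Int)) (j : Int) (hj : 0 ≤ j) :
    PySem.List.pyGetD (x :: xs) (j + 1) [] = PySem.List.pyGetD xs j [] := by
  obtain ⟨n, rfl⟩ := Int.eq_ofNat_of_zero_le hj
  have : ((n : Int) + 1) = ((n + 1 : Nat) : Int) := by push_cast; ring
  rw [this, PySem.List.pyGetD_natCast, PySem.List.pyGetD_natCast]
  simp

-- A's fold over enumerate(arrays[:-1]) equals a direct fold over the tail's column values
lemma foldA_eq_col (arrays : List (List Int)) (idx : Int) (subtract : Bool) :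
    (PySem.List.enumerate (PySem.List.slice arrays none (some (-1))) 0).foldl
      (fun (st : Int × Int) (p : Int × List Int) =>
        stepA subtract st (PySem.List.pyGetD (PySem.List.pyGetD arrays (p.1 + 1) []) idx 0)) (0, 0)
    = ((arrays.drop 1).map (fun a => PySem.List.pyGetD a idx 0)).foldl (stepA subtract) (0, 0) := by
  cases arrays with
  | nil => simp [PySem.List.slice, PySem.List.enumerate_nil]
  | cons a rest =>
    rw [PySem.List.slice_to_neg_one]
    rw [PySem.List.enumerate_eq_map_pyRange (xs := (a :: rest).dropLast) (d := ([] : List Int)), List.foldl_map]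
    simp only [PySem.List.len_eq]
    rw [show ((a :: rest).dropLast.length : Int) = (rest.length : Int) by simp]
    have hcong : ∀ (st : Int × Int) (j : Int), j ∈ PySem.List.pyRange 0 (rest.length : Int) 1 →
        stepA subtract st (PySem.List.pyGetD (PySem.List.pyGetD (a :: rest) (j + 1) []) idx 0)
        = stepA subtract st (PySem.List.pyGetD (PySem.List.pyGetD rest j []) idx 0) := by
      intro st j hj
      have h0 : 0 ≤ j := by
        have := (PySem.List.mem_pyRange_one.mp hj)
        omega
      simp only [pyGetD_cons_succ_nonneg a rest j h0]
    rw [PySem.List.foldl_congr_mem (h := hcong)]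
    rw [PySem.List.foldl_pyRange_zero_pyGetD' rest ([] : List Int)
      (fun st r => stepA subtract st (PySem.List.pyGetD r idx 0)) (0, 0)]
    simp [List.foldl_map]

-- ===== VERDICT (by name: the statement is the Claim_ definition above) =====
theorem get_last_value_spec : Claim_equal_get_last_value := by
  intro arrays idx subtract _ _
  unfold Spec_get_last_value get_last_value get_last_value_alt
  have hA := foldA_eq_col arrays idx subtract
  simp only [] at hA ⊢
  rw [show (fun (st : Int × Int) (p : Int × List Int) =>
        let next_val := PySem.List.pyGetD (PySem.List.pyGetD arrays (p.1 + 1) []) idx 0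
        let val := if subtract then next_val - st.2 else next_val + st.2
        (val, val))
      = (fun (st : Int × Int) (p : Int × List Int) =>
        stepA subtract st (PySem.List.pyGetD (PySem.List.pyGetD arrays (p.1 + 1) []) idx 0)) from rfl]
  rw [hA, foldl_stepA_pair]
  rw [PySem.List.slice_from_one]
  have htail : arrays.tail = arrays.drop 1 := by simp
  rw [htail]
  set col := ((arrays.drop 1).map (fun a => PySem.List.pyGetD a idx 0)) with hcol
  cases subtract with
  | false => simp [foldl_add_eq_sum]
  | true =>
    simp only [if_true]
    rw [foldl_sub_eq_altSum]
    rw [enum_signed_sum col 0 (col.length : Int) (by ring)]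
    simp
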